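-- pv_equiv track=rewrite | github.com/BrettRey/erdos-problem-993 | targeted.py | make_caterpillar
-- ===== SOURCE A (Python) =====
-- def make_caterpillar(spine_len: int, pendants: list[int]) -> tuple[int, list[list[int]]]:
--     """Caterpillar tree: path of spine_len vertices, each with pendants[i] leaves.
--
--     pendants[i] = number of pendant leaves at spine vertex i.
--     len(pendants) must equal spine_len.
--     """
--     assert len(pendants) == spine_len
--     n = spine_len + sum(pendants)
--     adj: list[list[int]] = [[] for _ in range(n)]
--
--     def _add_edge(u, v):
--         adj[u].append(v)
--         adj[v].append(u)
--
--     # Spine: 0, 1, ..., spine_len-1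
--     for i in range(spine_len - 1):
--         _add_edge(i, i + 1)
--
--     # Pendants
--     next_v = spine_len
--     for i in range(spine_len):
--         for _ in range(pendants[i]):
--             _add_edge(i, next_v)
--             next_v += 1
--
--     return n, adj
-- ===== SOURCE B (Python) =====
-- def make_caterpillar(spine_len: int, pendants: list[int]) -> tuple[int, list[list[int]]]:
--     """Caterpillar tree: path of spine_len vertices, each with pendants[i] leaves.
--
--     Non-incremental construction: prefix sums of pendants are computed once, and
--     then every vertex's adjacency row is a pure function of its own index --
--     spine rows read their leaf range straight out of the prefix table, and each
--     leaf finds its spine owner by counting prefix sums <= its leaf offset.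
--     """
--     assert len(pendants) == spine_len
--     prefix = [0]
--     acc = 0
--     for p in pendants:
--         acc += p
--         prefix.append(acc)
--     n = spine_len + acc
--
--     def row(v):
--         if v < spine_len:
--             return ([v - 1] if v > 0 else []) \
--                 + ([v + 1] if v < spine_len - 1 else []) \
--                 + [spine_len + j for j in range(prefix[v], prefix[v + 1])]
--         x = v - spine_len
--         return [sum(q <= x for q in prefix[1:])]
--
--     return n, [row(v) for v in range(n)]
-- ===== Notes on version B (the rewrite author's own statement) =====
-- stated objective: alternative
-- what changed: B computes a prefix-sum table of the pendant counts once and then builds every vertex's adjacency row as a pure function of its own index (spine rows read their leaf range from the table, each leaf counts prefix sums <= its offset to find its owner), instead of A's symmetric _add_edge mutation of a preallocated table with a running next_v counter.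
-- outside the precondition, e.g. on make_caterpillar(1, [-1]): A returns (0, []), B returns (0, []); on make_caterpillar(2, [-1, 1]): A raises IndexError, B returns (2, [[1], [0, 1]])
import Mathlib
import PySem

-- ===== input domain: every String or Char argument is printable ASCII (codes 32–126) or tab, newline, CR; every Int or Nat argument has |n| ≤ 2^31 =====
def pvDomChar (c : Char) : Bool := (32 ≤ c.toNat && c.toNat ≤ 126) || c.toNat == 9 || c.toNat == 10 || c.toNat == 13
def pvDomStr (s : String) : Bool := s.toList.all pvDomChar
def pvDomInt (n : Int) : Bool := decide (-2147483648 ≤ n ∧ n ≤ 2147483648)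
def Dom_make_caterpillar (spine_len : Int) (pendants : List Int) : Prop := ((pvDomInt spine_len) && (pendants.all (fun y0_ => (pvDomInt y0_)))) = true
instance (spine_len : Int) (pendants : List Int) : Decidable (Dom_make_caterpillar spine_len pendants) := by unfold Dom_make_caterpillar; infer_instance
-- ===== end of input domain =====

-- B precomputes prefix sums once and builds each vertex's row as a pure function of its
-- own index (leaves locate their owner by counting prefix sums), instead of A's
-- incremental symmetric edge insertion into a mutable table; same value, different algorithm.

-- ===== PORT A =====
-- _add_edge: adj[u].append(v); adj[v].append(u).  On every input admitted by
-- Pre_ both indices are nonnegative and in range, so `.toNat` + `modify` is exact there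
-- (Python raises IndexError out of range, excluded by Pre_).
def pvAddEdge (adj : List (List Int)) (u v : Int) : List (List Int) :=
  (adj.modify u.toNat (fun r => r ++ [v])).modify v.toNat (fun r => r ++ [u])

def make_caterpillar (spine_len : Int) (pendants : List Int) : Int × List (List Int) :=
  -- assert len(pendants) == spine_len : raises AssertionError otherwise (excluded by Pre_)
  let n := spine_len + pendants.sum
  let adj0 := List.replicate n.toNat ([] : List Int)
  let adj1 := (PySem.List.pyRange 0 (spine_len - 1) 1).foldl
      (fun a i => pvAddEdge a i (i + 1)) adj0
  -- pendants[i] : i is in range under Pre_, so pyGetD is exact there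
  let st := (PySem.List.pyRange 0 spine_len 1).foldl
      (fun (st : List (List Int) × Int) i =>
        (PySem.List.pyRange 0 (PySem.List.pyGetD pendants i 0) 1).foldl
          (fun (st : List (List Int) × Int) _ => (pvAddEdge st.1 i st.2, st.2 + 1)) st)
      (adj1, spine_len)
  (n, st.1)

-- ===== PORT B =====
-- row(v): prefix[v] / prefix[v+1] are in range whenever v is a spine index admitted by
-- Pre_, so pyGetD is exact there (Python raises IndexError out of range, excluded by Pre_);
-- sum(q <= x for q in prefix[1:]) is the count of prefix entries ≤ x.
def pvRow (spine_len : Int) (pfx : List Int) (v : Int) : List Int :=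
  if v < spine_len then
    (if v > 0 then [v - 1] else []) ++ (if v < spine_len - 1 then [v + 1] else [])
      ++ (PySem.List.pyRange (PySem.List.pyGetD pfx v 0) (PySem.List.pyGetD pfx (v + 1) 0) 1).map
          (fun j => spine_len + j)
  else
    [((PySem.List.slice pfx (some 1) none).countP (fun q => decide (q ≤ v - spine_len)) : Int)]

def make_caterpillar_alt (spine_len : Int) (pendants : List Int) : Int × List (List Int) :=
  -- assert len(pendants) == spine_len : raises AssertionError otherwise (excluded by Pre_)
  let st := pendants.foldl (fun (st : List Int × Int) p => (st.1 ++ [st.2 + p], st.2 + p)) ([0], 0)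
  let n := spine_len + st.2
  (n, (PySem.List.pyRange 0 n 1).map (pvRow spine_len st.1))

-- ===== PRECONDITION & SPEC =====
-- Pre_ excludes inputs where len(pendants) ≠ spine_len (A's assert raises) and inputs with
-- a negative pendant count, on which A raises IndexError except in degenerate all-empty
-- cases (where the two programs agree anyway).
def Pre_make_caterpillar (spine_len : Int) (pendants : List Int) : Prop :=
  (pendants.length : Int) = spine_len ∧ ∀ p ∈ pendants, 0 ≤ p
instance (spine_len : Int) (pendants : List Int) : Decidable (Pre_make_caterpillar spine_len pendants) := by unfold Pre_make_caterpillar; infer_instance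

def pvWitness_make_caterpillar : Int × List Int := (3, [1, 0, 2])

def Spec_make_caterpillar (spine_len : Int) (pendants : List Int) (out : Int × List (List Int)) : Prop := out = make_caterpillar_alt spine_len pendants
instance (spine_len : Int) (pendants : List Int) (out : Int × List (List Int)) : Decidable (Spec_make_caterpillar spine_len pendants out) := by unfold Spec_make_caterpillar; infer_instance

-- ===== CLAIM (what is proved, stated in full; the proofs are below) =====
def Claim_equal_make_caterpillar : Prop := ∀ (spine_len : Int) (pendants : List Int), Dom_make_caterpillar spine_len pendants → Pre_make_caterpillar spine_len pendants → Spec_make_caterpillar spine_len pendants (make_caterpillar spine_len pendants)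

-- ===== LEMMAS AND PROOFS =====

-- spine-neighbour prefix of the row of spine vertex i
def pvSrow (S i : Int) : List Int :=
  (if i > 0 then [i - 1] else []) ++ (if i < S - 1 then [i + 1] else [])

-- closed-form rows: (spine rows, leaf rows) for the suffix of pendants starting
-- at spine index i, whose first leaf index is base
def pvRows (S : Int) : Int → Int → List Int → List (List Int) × List (List Int)
  | _, _, [] => ([], [])
  | i, base, p :: ps =>
    let r := pvRows S (i + 1) (base + p) ps
    ((pvSrow S i ++ PySem.List.pyRange base (base + p) 1) :: r.1,
     List.replicate p.toNat [i] ++ r.2)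

-- partial sums of ps starting from accumulator b (= prefix[1:] of B)
def pvPsums : Int → List Int → List Int
  | _, [] => []
  | b, p :: ps => (b + p) :: pvPsums (b + p) ps

theorem modify_append_left {α : Type} (xs ys : List α) (k : Nat) (f : α → α)
    (h : k < xs.length) : (xs ++ ys).modify k f = xs.modify k f ++ ys := by
  induction xs generalizing k with
  | nil => simp at h
  | cons a xs ih =>
    cases k with
    | zero => simp [List.modify_cons]
    | succ k => simp [ih k (by simpa using h)]

theorem modify_append_head {α : Type} (xs : List α) (y : α) (ys : List α) (k : Nat)
    (f : α → α) (h : k = xs.length) : (xs ++ y :: ys).modify k f = xs ++ f y :: ys := by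
  subst h
  induction xs with
  | nil => simp [List.modify_cons]
  | cons a xs ih => simp [ih]

theorem pvAddEdge_length (adj : List (List Int)) (u v : Int) :
    (pvAddEdge adj u v).length = adj.length := by
  simp [pvAddEdge]

-- length preservation of the spine fold
theorem spineFold_length (l : List Int) (adj : List (List Int)) :
    (l.foldl (fun a i => pvAddEdge a i (i + 1)) adj).length = adj.length := by
  induction l generalizing adj with
  | nil => rfl
  | cons x l ih => simp [List.foldl_cons, ih, pvAddEdge_length]

theorem pvAddEdge_getElem (adj : List (List Int)) (u v : Int) (j : Nat)
    (hj : j < (pvAddEdge adj u v).length) :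
    (pvAddEdge adj u v)[j]
    = (if u.toNat = j ∧ j < adj.length then
        (adj[j]'(by simpa [pvAddEdge] using hj)) ++ [v]
       else if j < adj.length then adj[j]'(by simpa [pvAddEdge] using hj) else [])
      ++ (if v.toNat = j ∧ j < adj.length then [u] else []) := by
  have hj' : j < adj.length := by simpa [pvAddEdge] using hj
  unfold pvAddEdge
  simp only [List.getElem_modify, hj']
  by_cases h1 : u.toNat = j <;> by_cases h2 : v.toNat = j <;> simp [h1, h2]

-- pointwise description of the spine fold
theorem spineFold_getElem (e : Nat) (adj : List (List Int)) (he : e < adj.length)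
    (j : Nat) (hj : j < adj.length) :
    ((PySem.List.pyRange 0 (e : Int) 1).foldl (fun a i => pvAddEdge a i (i + 1)) adj)[j]'(by
        rw [spineFold_length]; exact hj)
    = adj[j] ++ (if 1 ≤ j ∧ j ≤ e then [(j : Int) - 1] else [])
        ++ (if j < e then [(j : Int) + 1] else []) := by
  induction e with
  | zero =>
    simp only [Nat.cast_zero, PySem.List.pyRange_one_eq_nil (le_refl (0 : Int)), List.foldl_nil]
    have h1 : ¬ (1 ≤ j ∧ j ≤ 0) := by omega
    have h2 : ¬ (j < 0) := by omega
    rw [if_neg h1, if_neg h2]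
    simp
  | succ e ih =>
    have hsplit : PySem.List.pyRange 0 (((e + 1 : Nat)) : Int) 1
        = PySem.List.pyRange 0 (e : Int) 1 ++ [(e : Int)] := by
      push_cast
      exact PySem.List.pyRange_one_succ_right (by positivity)
    have he' : e < adj.length := Nat.lt_of_succ_lt he
    have hlen : ((PySem.List.pyRange 0 (e : Int) 1).foldl
        (fun a i => pvAddEdge a i (i + 1)) adj).length = adj.length := spineFold_length _ _
    have htn : ((e : Int) + 1).toNat = e + 1 := by omega
    simp only [hsplit, List.foldl_append, List.foldl_cons, List.foldl_nil]
    simp only [pvAddEdge_getElem, Int.toNat_natCast, htn, hlen, hj]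
    rw [ih he']
    rcases Nat.lt_trichotomy j e with hje | hje | hje
    · have h1 : ¬ (e + 1 = j) := by omega
      have h2 : ¬ (e = j) := by omega
      have h3 : (j ≤ e) ↔ (j ≤ e + 1) := by omega
      have h4 : (j < e) := hje
      have h5 : (j < e + 1) := by omega
      simp [h1, h2, h3, h4, h5]
    · subst hje
      have h2 : j ≤ j ∧ j ≤ j + 1 := by omega
      have h4 : j < j + 1 := by omega
      simp [h2.2, h4, List.append_assoc]
    · rcases Nat.lt_trichotomy j (e + 1) with hje1 | hje1 | hje1
      · omega
      · subst hje1
        have h2 : ¬ (e + 1 ≤ e) := by omega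
        have h3 : ¬ (e + 1 < e) := by omega
        have h5 : 1 ≤ e + 1 ∧ e + 1 ≤ e + 1 := by omega
        simp [h2, h3, h5.1]
      · have h1 : ¬ (e + 1 = j) := by omega
        have h2 : ¬ (e = j) := by omega
        have h3 : ¬ (j ≤ e) := by omega
        have h4 : ¬ (j ≤ e + 1) := by omega
        have h5 : ¬ (j < e) := by omega
        have h6 : ¬ (j < e + 1) := by omega
        simp [h1, h2, h3, h4, h5, h6]

-- inner pendant loop: append c consecutive leaves at vertex i
theorem innerFold (c : Nat) (i : Int) (P : List (List Int)) (E : Nat)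
    (hc : c ≤ E) (hi : i.toNat < P.length) :
    ((PySem.List.pyRange 0 (c : Int) 1).foldl
        (fun (st : List (List Int) × Int) _ => (pvAddEdge st.1 i st.2, st.2 + 1))
        (P ++ List.replicate E ([] : List Int), (P.length : Int)))
    = (P.modify i.toNat (fun r => r ++ PySem.List.pyRange (P.length : Int) ((P.length : Int) + c) 1)
        ++ List.replicate c [i] ++ List.replicate (E - c) ([] : List Int),
       (P.length : Int) + c) := by
  induction c with
  | zero =>
    have hf : (fun r : List Int => r ++ PySem.List.pyRange (P.length : Int) ((P.length : Int) + ((0:Nat):Int)) 1) = id := by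
      funext r
      rw [PySem.List.pyRange_one_eq_nil (by omega : (P.length : Int) + ((0:Nat):Int) ≤ (P.length : Int))]
      simp
    rw [hf, List.modify_id]
    simp [PySem.List.pyRange_one_eq_nil (le_refl (0 : Int))]
  | succ c ih =>
    have hc' : c ≤ E := Nat.le_of_succ_le hc
    have hsplit : PySem.List.pyRange 0 (((c + 1 : Nat)) : Int) 1
        = PySem.List.pyRange 0 (c : Int) 1 ++ [(c : Int)] := by
      push_cast
      exact PySem.List.pyRange_one_succ_right (by positivity)
    rw [hsplit, List.foldl_append, ih hc']
    simp only [List.foldl_cons, List.foldl_nil]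
    have hrep : List.replicate (E - c) ([] : List Int)
        = ([] : List Int) :: List.replicate (E - (c + 1)) [] := by
      rw [show E - c = (E - (c + 1)) + 1 from by omega, List.replicate_succ]
    have hlenP' : (P.modify i.toNat
        (fun r => r ++ PySem.List.pyRange (P.length : Int) ((P.length : Int) + c) 1)).length
        = P.length := List.length_modify _ _ _
    have hcomb : (fun r => r ++ [(P.length : Int) + c])
        ∘ (fun r => r ++ PySem.List.pyRange (P.length : Int) ((P.length : Int) + c) 1)
        = fun r => r ++ PySem.List.pyRange (P.length : Int) ((P.length : Int) + ((c + 1 : Nat) : Int)) 1 := by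
      funext r
      have h2 : PySem.List.pyRange (P.length : Int) ((P.length : Int) + c + 1) 1
          = PySem.List.pyRange (P.length : Int) ((P.length : Int) + c) 1 ++ [(P.length : Int) + c] :=
        PySem.List.pyRange_one_succ_right (by omega)
      simp only [Nat.cast_add, Nat.cast_one, Function.comp_apply, List.append_assoc]
      rw [show (P.length : Int) + ((c : Int) + 1) = (P.length : Int) + (c : Int) + 1 from by ring, h2]
    unfold pvAddEdge
    rw [hrep]
    rw [modify_append_left _ _ i.toNat _ (by simp [hlenP']; omega)]
    rw [modify_append_left _ _ i.toNat _ (by simp [hlenP']; omega)]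
    rw [List.modify_modify_eq, hcomb]
    rw [modify_append_head _ _ _ _ _ (by simp; omega)]
    refine Prod.ext ?_ ?_
    · simp [List.replicate_succ', List.append_assoc]
    · simp
      ring

-- innerFold with the initial state given by equations (for rewriting in context)
theorem innerFold' (c : Nat) (i next : Int) (adj P : List (List Int)) (E : Nat)
    (hadj : adj = P ++ List.replicate E ([] : List Int)) (hnext : next = (P.length : Int))
    (hc : c ≤ E) (hi : i.toNat < P.length) :
    ((PySem.List.pyRange 0 (c : Int) 1).foldl
        (fun (st : List (List Int) × Int) _ => (pvAddEdge st.1 i st.2, st.2 + 1)) (adj, next))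
    = (P.modify i.toNat (fun r => r ++ PySem.List.pyRange (P.length : Int) ((P.length : Int) + c) 1)
        ++ List.replicate c [i] ++ List.replicate (E - c) ([] : List Int),
       (P.length : Int) + c) := by
  subst hadj hnext
  exact innerFold c i P E hc hi

-- outer pendant loop (enumerate form)
theorem outerFold (S : Int) (ps : List Int) : ∀ (i : Int) (A B : List (List Int)),
    (∀ p ∈ ps, 0 ≤ p) → A.length = i.toNat → 0 ≤ i →
    ((PySem.List.enumerate ps i).foldl
        (fun (st : List (List Int) × Int) (ip : Int × Int) =>
          (PySem.List.pyRange 0 ip.2 1).foldl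
            (fun (st : List (List Int) × Int) _ => (pvAddEdge st.1 ip.1 st.2, st.2 + 1)) st)
        (A ++ (List.range ps.length).map (fun k : Nat => pvSrow S (i + (k : Int))) ++ B
           ++ List.replicate ps.sum.toNat ([] : List Int),
         ((A.length + ps.length + B.length : Nat) : Int)))
    = (A ++ (pvRows S i ((A.length + ps.length + B.length : Nat) : Int) ps).1
         ++ (B ++ (pvRows S i ((A.length + ps.length + B.length 
: Nat) : Int) ps).2),
       ((A.length + ps.length + B.length : Nat) : Int) + ps.sum) := by
  induction ps with
  | nil =>
    intro i A B _ _ _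
    simp [pvRows]
  | cons p ps ih =>
    intro i A B hpos hA hi0
    have hp : 0 ≤ p := hpos p (by simp)
    have hsum : 0 ≤ ps.sum := List.sum_nonneg (fun q hq => hpos q (by simp [hq]))
    obtain ⟨cp, rfl⟩ : ∃ cp : Nat, p = (cp : Int) := ⟨p.toNat, (Int.toNat_of_nonneg hp).symm⟩
    rw [PySem.List.enumerate_cons, List.foldl_cons]
    have hMsplit : (List.range (((cp : Int) :: ps).length)).map (fun k : Nat => pvSrow S (i + (k : Int)))
        = pvSrow S i :: (List.range ps.length).map (fun k : Nat => pvSrow S ((i + 1) + (k : Int))) := by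
      simp only [List.length_cons, List.range_succ_eq_map, List.map_cons, List.map_map]
      refine congrArg₂ List.cons (by norm_num) ?_
      apply List.map_congr_left
      intro k _
      simp only [Function.comp_apply]
      congr 1
      push_cast
      ring
    rw [hMsplit]
    simp only [List.sum_cons, List.append_assoc, List.cons_append] at *
    set m := (List.range ps.length).map (fun k : Nat => pvSrow S ((i + 1) + (k : Int))) with hm
    have hmlen : m.length = ps.length := by simp [hm]
    -- the first enumerated step is the inner pendant loop at vertex i
    have hcnt : ((A.length + ((cp : Int) :: ps).length + B.length : Nat) : Int)
        = (((A ++ pvSrow S i :: (m ++ B))).length : Int) := by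
      simp [hmlen]
      omega
    have hE : ((cp : Int) + ps.sum).toNat = cp + ps.sum.toNat := by omega
    rw [hcnt]
    rw [innerFold' cp i _ _ (A ++ pvSrow S i :: (m ++ B)) (cp + ps.sum.toNat)
      (by simp [List.append_assoc, hE]) rfl (by omega) (by simp [hA])]
    have hEc : cp + ps.sum.toNat - cp = ps.sum.toNat := by omega
    rw [hEc]
    rw [modify_append_head _ _ _ _ _ hA.symm]
    set L : Int := ((A ++ pvSrow S i :: (m ++ B)).length : Int) with hL
    set row : List Int := pvSrow S i ++ PySem.List.pyRange L (L + (cp : Int)) 1 with hrow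
    have hA2 : (A ++ [row]).length = (i + 1).toNat := by simp [hA]; omega
    have hstate : ((A ++ row :: (m ++ B)) ++ List.replicate cp [i] ++ List.replicate ps.sum.toNat ([] : List Int), L + (cp : Int))
        = ((A ++ [row]) ++ (m ++ ((B ++ List.replicate cp [i]) ++ List.replicate ps.sum.toNat ([] : List Int))),
           (((A ++ [row]).length + ps.length + (B ++ List.replicate cp [i]).length : Nat) : Int)) := by
      refine Prod.ext ?_ ?_
      · simp [List.append_assoc]
      · simp [hL, hmlen]
        ring
    rw [hstate, hm, ih (i + 1) (A ++ [row]) (B ++ List.replicate cp [i])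
      (fun q hq => hpos q (by simp [hq])) hA2 (by omega)]
    have hC : (((A ++ [row]).length + ps.length + (B ++ List.replicate cp [i]).length : Nat) : Int)
        = L + (cp : Int) := by
      simp [hL, hmlen]
      ring
    rw [hC]
    refine Prod.ext ?_ ?_
    · simp [pvRows, Int.toNat_natCast, hrow, List.append_assoc]
    · push_cast
      ring

-- assembled spine fold: the adjacency after the spine loop
theorem spineStep (ps : List Int) (hps : ps ≠ []) (hpos : ∀ p ∈ ps, 0 ≤ p) :
    ((PySem.List.pyRange 0 ((ps.length : Int) - 1) 1).foldl (fun a i => pvAddEdge a i (i + 1))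
        (List.replicate ((ps.length : Int) + ps.sum).toNat ([] : List Int)))
    = (List.range ps.length).map (fun j : Nat => pvSrow (ps.length : Int) (j : Int))
        ++ List.replicate ps.sum.toNat ([] : List Int) := by
  have hL : 1 ≤ ps.length := List.length_pos_iff.mpr hps
  have hsum : 0 ≤ ps.sum := List.sum_nonneg hpos
  have hn : ((ps.length : Int) + ps.sum).toNat = ps.length + ps.sum.toNat := by omega
  rw [show ((ps.length : Int) - 1) = ((ps.length - 1 : Nat) : Int) from by push_cast [hL]; ring]
  apply List.ext_getElem
  · simp [spineFold_length, hn]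
  · intro j hj1 hj2
    rw [spineFold_getElem (ps.length - 1) _ (by simp [hn]; omega) j (by simp [hn]; simp at hj2; omega)]
    have hj : j < ps.length + ps.sum.toNat := by simpa [hn] using hj2
    rw [List.getElem_replicate, List.getElem_append]
    by_cases hjL : j < ps.length
    · rw [dif_pos (by simpa using hjL)]
      rw [List.getElem_map, List.getElem_range]
      unfold pvSrow
      have h1 : (1 ≤ j ∧ j ≤ ps.length - 1) ↔ ((j : Int) > 0) := by
        omega
      have h2 : (j < ps.length - 1) ↔ ((j : Int) < (ps.length : Int) - 1) := by
        omega
      split_ifs with a1 a2 a3 a4 a5 a6 <;> first | omega | simp_all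
    · rw [dif_neg (by simpa using hjL)]
      have h1 : ¬ (1 ≤ j ∧ j ≤ ps.length - 1) := by omega
      have h2 : ¬ (j < ps.length - 1) := by omega
      rw [if_neg h1, if_neg h2]
      simp

-- outer pendant loop specialised to the initial state of make_caterpillar
theorem outerFold0 (S : Int) (ps : List Int) (adj : List (List Int)) (next : Int)
    (hpos : ∀ p ∈ ps, 0 ≤ p)
    (hadj : adj = (List.range ps.length).map (fun j : Nat => pvSrow S (j : Int))
        ++ List.replicate ps.sum.toNat ([] : List Int))
    (hnext : next = (ps.length : Int)) :
    ((PySem.List.enumerate ps).foldl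
        (fun (st : List (List Int) × Int) (ip : Int × Int) =>
          (PySem.List.pyRange 0 ip.2 1).foldl
            (fun (st : List (List Int) × Int) _ => (pvAddEdge st.1 ip.1 st.2, st.2 + 1)) st)
        (adj, next))
    = ((pvRows S 0 (ps.length : Int) ps).1 ++ (pvRows S 0 (ps.length : Int) ps).2,
       (ps.length : Int) + ps.sum) := by
  subst hadj hnext
  have h := outerFold S ps 0 [] [] hpos (by simp) le_rfl
  simpa using h

-- ===== B-side lemmas =====

-- B's prefix loop computes the partial sums
theorem prefixFold (ps : List Int) : ∀ (acc : List Int) (b : Int),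
    ps.foldl (fun (st : List Int × Int) p => (st.1 ++ [st.2 + p], st.2 + p)) (acc, b)
    = (acc ++ pvPsums b ps, b + ps.sum) := by
  induction ps with
  | nil => intro acc b; simp [pvPsums]
  | cons p ps ih =>
    intro acc b
    rw [List.foldl_cons, ih]
    simp [pvPsums, add_assoc]

theorem psums_length (ps : List Int) : ∀ b, (pvPsums b ps).length = ps.length := by
  induction ps with
  | nil => intro b; rfl
  | cons p ps ih => intro b; simp [pvPsums, ih]

theorem psums_getElem (ps : List Int) : ∀ (b : Int) (j : Nat) (hj : j < ps.length),
    (pvPsums b ps)[j]'(by rw [psums_length]; exact hj) = b + (ps.take (j + 1)).sum := by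
  induction ps with
  | nil => intro b j hj; simp at hj
  | cons p ps ih =>
    intro b j hj
    cases j with
    | zero => simp [pvPsums]
    | succ j =>
      have := ih (b + p) j (by simpa using hj)
      simp only [pvPsums, List.getElem_cons_succ, this, List.take_succ_cons, List.sum_cons]
      try ring

-- every partial sum of a nonnegative list is ≥ its accumulator
theorem psums_lb (ps : List Int) : ∀ (b : Int), (∀ p ∈ ps, 0 ≤ p) →
    ∀ q ∈ pvPsums b ps, b ≤ q := by
  induction ps with
  | nil => intro b _ q hq; simp [pvPsums] at hq
  | cons p ps ih =>
    intro b hpos q hq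
    have hp : 0 ≤ p := hpos p (by simp)
    rcases (by simpa [pvPsums] using hq : q = b + p ∨ q ∈ pvPsums (b + p) ps) with rfl | hq'
    · omega
    · have := ih (b + p) (fun r hr => hpos r (by simp [hr])) q hq'
      omega

-- prefix table lookup: prefix[k] = sum of the first k pendants
theorem getD_prefix (ps : List Int) (k : Nat) (hk : k ≤ ps.length) :
    PySem.List.pyGetD ((0 : Int) :: pvPsums 0 ps) (k : Int) 0 = (ps.take k).sum := by
  cases k with
  | zero => simp [PySem.List.pyGetD]
  | succ k =>
    rw [PySem.List.pyGetD_eq_getElem _ 0 (by exact_mod_cast Nat.zero_le _)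
      (by simp [psums_length]; omega)]
    simp only [Int.toNat_natCast, List.getElem_cons_succ]
    have := psums_getElem ps 0 k (by omega)
    rw [this]
    ring

-- shifting a unit range
theorem map_add_pyRange (c a b : Int) :
    (PySem.List.pyRange a b 1).map (fun j => c + j) = PySem.List.pyRange (c + a) (c + b) 1 := by
  apply List.ext_getElem
  · simp only [List.length_map, PySem.List.length_pyRange_one]
    omega
  · intro j hj1 hj2
    simp only [List.getElem_map, PySem.List.getElem_pyRange_one]
    ring

-- lengths of the closed-form row lists
theorem pvRows_fst_length (S : Int) (ps : List Int) : ∀ i base,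
    (pvRows S i base ps).1.length = ps.length := by
  induction ps with
  | nil => intro i base; rfl
  | cons p ps ih => intro i base; simp [pvRows, ih]

-- pointwise description of the closed-form spine rows
theorem pvRows_fst_getElem (S : Int) (ps : List Int) : ∀ (i base : Int) (j : Nat)
    (hj : j < ps.length),
    (pvRows S i base ps).1[j]'(by rw [pvRows_fst_length]; exact hj)
    = pvSrow S (i + j) ++ PySem.List.pyRange (base + (ps.take j).sum)
        (base + (ps.take (j + 1)).sum) 1 := by
  induction ps with
  | nil => intro i base j hj; simp at hj
  | cons p ps ih =>
    intro i base j hj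
    cases j with
    | zero => simp [pvRows]
    | succ j =>
      have := ih (i + 1) (base + p) j (by simpa using hj)
      simp only [pvRows, List.getElem_cons_succ, this, List.take_succ_cons, List.sum_cons]
      congr 2 <;> push_cast <;> ring

-- B's leaf map: counting partial sums ≤ the leaf offset recovers the owner
theorem leafMap (ps : List Int) : ∀ (i b : Int) (base : Int) (S : Int),
    (∀ p ∈ ps, 0 ≤ p) →
    (PySem.List.pyRange b (b + ps.sum) 1).map
        (fun x => [i + (((pvPsums b ps).countP (fun q => decide (q ≤ x)) : Nat) : Int)])
    = (pvRows S i base ps).2 := by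
  induction ps with
  | nil =>
    intro i b base S _
    rw [show b + ([] : List Int).sum = b from by simp, PySem.List.pyRange_one_eq_nil le_rfl]
    simp [pvRows]
  | cons p ps ih =>
    intro i b base S hpos
    have hp : 0 ≤ p := hpos p (by simp)
    have hsum : 0 ≤ ps.sum := List.sum_nonneg (fun q hq => hpos q (by simp [hq]))
    have hsplit : PySem.List.pyRange b (b + (p :: ps).sum) 1
        = PySem.List.pyRange b (b + p) 1 ++ PySem.List.pyRange (b + p) (b + (p :: ps).sum) 1 := by
      apply PySem.List.pyRange_one_append <;> simp <;> omega
    rw [hsplit, List.map_append]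
    have hfirst : (PySem.List.pyRange b (b + p) 1).map
        (fun x => [i + (((pvPsums b (p :: ps)).countP (fun q => decide (q ≤ x)) : Nat) : Int)])
        = List.replicate p.toNat [i] := by
      have hc : ∀ x ∈ PySem.List.pyRange b (b + p) 1,
          (fun x => [i + (((pvPsums b (p :: ps)).countP (fun q => decide (q ≤ x)) : Nat) : Int)]) x
          = (fun _ => [i]) x := by
        intro x hx
        rw [PySem.List.mem_pyRange_one] at hx
        have hzero : (pvPsums b (p :: ps)).countP (fun q => decide (q ≤ x)) = 0 := by
          rw [List.countP_eq_zero]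
          intro q hq
          rcases (by simpa [pvPsums] using hq : q = b + p ∨ q ∈ pvPsums (b + p) ps) with rfl | hq'
          · simpa using (by omega : ¬ (b + p ≤ x))
          · have := psums_lb ps (b + p) (fun r hr => hpos r (by simp [hr])) q hq'
            simpa using (by omega : ¬ (q ≤ x))
        simp [hzero]
      rw [List.map_congr_left hc, List.map_const']
      rw [PySem.List.length_pyRange_one]
      congr 1
      omega
    have hsecond : (PySem.List.pyRange (b + p) (b + (p :: ps).sum) 1).map
        (fun x => [i + (((pvPsums b (p :: ps)).countP (fun q => decide (q ≤ x)) : Nat) : Int)])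
        = (pvRows S (i + 1) (base + p) ps).2 := by
      have hc : ∀ x ∈ PySem.List.pyRange (b + p) (b + (p :: ps).sum) 1,
          (fun x => [i + (((pvPsums b (p :: ps)).countP (fun q => decide (q ≤ x)) : Nat) : Int)]) x
          = (fun x => [(i + 1) + (((pvPsums (b + p) ps).countP (fun q => decide (q ≤ x)) : Nat) : Int)]) x := by
        intro x hx
        rw [PySem.List.mem_pyRange_one] at hx
        have hhd : decide (b + p ≤ x) = true := by simp only [decide_eq_true_eq]; omega
        simp [pvPsums, hhd]
        ring
      rw [List.map_congr_left hc]
      have : b + (p :: ps).sum = (b + p) + ps.sum := by simp; ring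
      rw [this]
      exact ih (i + 1) (b + p) (base + p) S (fun r hr => hpos r (by simp [hr]))
    rw [hfirst, hsecond]
    simp [pvRows]

-- ===== VERDICT (by name: the statement is the Claim_ definition above) =====
theorem make_caterpillar_spec : Claim_equal_make_caterpillar := by
  intro spine_len pendants _ hpre
  obtain ⟨hlen, hpos⟩ := hpre
  unfold Spec_make_caterpillar
  subst hlen
  rcases pendants with _ | ⟨p0, ps0⟩
  · decide
  · set ps := p0 :: ps0 with hps
    have hsum : 0 ≤ ps.sum := List.sum_nonneg hpos
    simp only [make_caterpillar, make_caterpillar_alt]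
    rw [spineStep ps (by simp [hps]) hpos]
    have henum : ((PySem.List.pyRange 0 ((ps.length : Int)) 1).foldl
        (fun (st : List (List Int) × Int) i =>
          (PySem.List.pyRange 0 (PySem.List.pyGetD ps i 0) 1).foldl
            (fun (st : List (List Int) × Int) _ => (pvAddEdge st.1 i st.2, st.2 + 1)) st)
        ((List.range ps.length).map (fun j : Nat => pvSrow ((ps.length : Int)) (j : Int))
          ++ List.replicate ps.sum.toNat ([] : List Int), ((ps.length : Int))))
        = ((PySem.List.enumerate ps).foldl
            (fun (st : List (List Int) × Int) (ip : Int × Int) =>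
              (PySem.List.pyRange 0 ip.2 1).foldl
                (fun (st : List (List Int) × Int) _ => (pvAddEdge st.1 ip.1 st.2, st.2 + 1)) st)
            ((List.range ps.length).map (fun j : Nat => pvSrow ((ps.length : Int)) (j : Int))
              ++ List.replicate ps.sum.toNat ([] : List Int), ((ps.length : Int)))) := by
      rw [PySem.List.enumerate_eq_map_pyRange ps 0, List.foldl_map]
      simp [PySem.List.len]
    rw [henum, outerFold0 _ _ _ _ hpos rfl rfl]
    -- B side
    rw [prefixFold ps [0] 0]
    simp only [List.nil_append, zero_add, List.cons_append]
    refine congrArg₂ Prod.mk rfl ?_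
    -- split range(n) at the spine/leaf boundary
    have hb : PySem.List.pyRange 0 ((ps.length : Int) + ps.sum) 1
        = PySem.List.pyRange 0 (ps.length : Int) 1
          ++ PySem.List.pyRange (ps.length : Int) ((ps.length : Int) + ps.sum) 1 := by
      apply PySem.List.pyRange_one_append <;> omega
    rw [hb, List.map_append]
    refine (congrArg₂ (· ++ ·) ?_ ?_).symm
    -- spine rows
    · apply List.ext_getElem
      · simp [pvRows_fst_length, PySem.List.length_pyRange_one]
      · intro j hj1 hj2
        have hjlen : j < ps.length := by rwa [pvRows_fst_length] at hj2
        simp only [List.getElem_map, PySem.List.getElem_pyRange_one, zero_add]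
        rw [pvRows_fst_getElem _ _ _ _ _ hjlen]
        unfold pvRow
        rw [if_pos (by exact_mod_cast hjlen)]
        rw [getD_prefix ps j (by omega)]
        rw [show ((j : Int) + 1) = (((j + 1 : Nat)) : Int) from by push_cast; ring]
        rw [getD_prefix ps (j + 1) (by omega)]
        rw [map_add_pyRange]
        unfold pvSrow
        simp
    -- leaf rows
    · have hshift : PySem.List.pyRange (ps.length : Int) ((ps.length : Int) + ps.sum) 1
          = (PySem.List.pyRange 0 ps.sum 1).map (fun x => (ps.length : Int) + x) := by
        rw [map_add_pyRange]
        simp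
      rw [hshift, List.map_map]
      have hc : ∀ x ∈ PySem.List.pyRange 0 ps.sum 1,
          (pvRow (ps.length : Int) (0 :: pvPsums 0 ps) ∘ (fun x => (ps.length : Int) + x)) x
          = (fun x => [(0 : Int) + (((pvPsums 0 ps).countP (fun q => decide (q ≤ x)) : Nat) : Int)]) x := by
        intro x hx
        rw [PySem.List.mem_pyRange_one] at hx
        simp only [Function.comp_apply]
        unfold pvRow
        rw [if_neg (by omega)]
        rw [PySem.List.slice_from_one]
        simp only [List.tail_cons]
        have hx0 : (ps.length : Int) + x - (ps.length : Int) = x := by ring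
        rw [hx0]
        simp
      rw [List.map_congr_left hc]
      have := leafMap ps 0 0 (ps.length : Int) (ps.length : Int) hpos
      rw [show (0 : Int) + ps.sum = ps.sum from by ring] at this
      rw [this]
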